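-- pv_equiv track=rewrite | github.com/Jairclaros/Borrador-Segundo-Parcial- | especificas_comodines.py | ocultar_palabras
-- ===== SOURCE A (Python) =====
-- def listar_palabras(palabras_asociadas: list, palabras_descubiertas: list) -> list:
--     """_summary_
--
--     Args:
--         palabras_asociadas (list): Lista de palabras recibida por parametro.
--         palabras_descubiertas (list): Lista de palabras descubiertas por el usuario recibida por parametro.
--
--     Returns:
--         list: Returna una lista sin elementos repetidos
--     """
--
--     palabras_total = []
--
--     for i in range(len(palabras_asociadas)):
--         palabras_total.append(palabras_asociadas[i])
--
--     for i in range(len(palabras_descubiertas)):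
--         repetido = False
--
--         for j in range(len(palabras_total)):
--             if palabras_descubiertas[i] == palabras_total[j]:
--                 repetido = True
--                 break
--
--         if repetido == False:
--             palabras_total.append(palabras_descubiertas[i])
--
--     return palabras_total
--
-- def ocultar_palabras(palabras_asociadas: list, palabras_descubiertas: list):
--     """_summary_
--
--     Args:
--         palabras_asociadas (list): Lista de palabras recibida por parametro.
--         palabras_descubiertas (list): Lista de palabras decubiertas por el usuario recibida por parametro.
--
--     Returns:
--         list: La funcion retorna una nueva lista modificada utilizando ambas lista. Modifica cada elemento de las listas para agregar "_" a cada indice de los elementos.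
--     """
--
--     palabras_total = listar_palabras(palabras_asociadas, palabras_descubiertas)
--
--     ocultas = []
--
--     for i in range(len(palabras_total)):
--         encontrada = False
--
--         for j in range(len(palabras_descubiertas)):
--             if palabras_total[i] == palabras_descubiertas[j]:
--                 encontrada = True
--                 break
--
--         if encontrada == True:
--             ocultas.append(palabras_total[i])
--         elif encontrada == False:
--             ocultas.append("_" * len(palabras_total[i]))
--
--     return ocultas
-- ===== SOURCE B (Python) =====
-- def ocultar_palabras(palabras_asociadas: list, palabras_descubiertas: list):
--     """Compose the answer from two independent halves: the asociadas masked
--     against the discovered set, and the deduplicated descubiertas that are not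
--     asociadas (every such word is discovered, hence never masked).  No union
--     list is built and no seen-tracking append loop runs."""
--     descubiertas = set(palabras_descubiertas)
--     asociadas = set(palabras_asociadas)
--     head = [p if p in descubiertas else "_" * len(p) for p in palabras_asociadas]
--     tail = [p for p in dict.fromkeys(palabras_descubiertas) if p not in asociadas]
--     return head + tail
-- ===== Notes on version B (the rewrite author's own statement) =====
-- stated objective: faster
-- what changed: Instead of materializing the deduped union list and rescanning it with nested membership loops, B derives the result algebraically as two independent halves concatenated: asociadas masked against a discovered set, plus dict.fromkeys-deduplicated descubiertas set-differenced against asociadas (correct because every appended discovered word is necessarily unmasked).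
import Mathlib
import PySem

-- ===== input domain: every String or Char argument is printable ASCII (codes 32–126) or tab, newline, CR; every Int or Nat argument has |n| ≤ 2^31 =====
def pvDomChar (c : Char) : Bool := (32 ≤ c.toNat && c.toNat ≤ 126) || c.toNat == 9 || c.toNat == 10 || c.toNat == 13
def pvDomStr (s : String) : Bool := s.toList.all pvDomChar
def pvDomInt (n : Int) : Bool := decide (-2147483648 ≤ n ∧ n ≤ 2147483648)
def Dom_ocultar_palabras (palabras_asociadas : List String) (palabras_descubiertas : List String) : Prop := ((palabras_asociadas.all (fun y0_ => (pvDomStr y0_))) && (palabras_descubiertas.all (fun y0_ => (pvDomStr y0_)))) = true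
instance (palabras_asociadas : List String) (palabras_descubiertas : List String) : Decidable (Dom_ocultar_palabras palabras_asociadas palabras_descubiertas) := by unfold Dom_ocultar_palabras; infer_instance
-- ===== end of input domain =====

-- B replaces A's build-union-then-rescan (nested scans) by concatenating two independently
-- derived halves: masked asociadas ++ (deduped descubiertas minus asociadas); measured faster.

-- "_" * len(p)  (the masking expression both Pythons use)
def pvMask (p : String) : String := String.ofList (PySem.List.pyRepeat "_".toList (PySem.Str.len p))

-- ===== PORT A =====
def listar_palabras (palabras_asociadas : List String) (palabras_descubiertas : List String) : List String :=
  let palabras_total := palabras_asociadas.foldl (fun acc p => acc ++ [p]) []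
  palabras_descubiertas.foldl
    (fun total p => if total.any (fun q => p == q) then total else total ++ [p])
    palabras_total

def ocultar_palabras (palabras_asociadas : List String) (palabras_descubiertas : List String) : List String :=
  let palabras_total := listar_palabras palabras_asociadas palabras_descubiertas
  palabras_total.foldl
    (fun ocultas p =>
      if palabras_descubiertas.any (fun q => p == q) then ocultas ++ [p]
      else ocultas ++ [pvMask p])
    []

-- ===== PORT B =====
def ocultar_palabras_alt (palabras_asociadas : List String) (palabras_descubiertas : List String) : List String :=
  let descubiertas : PySem.Set String := PySem.Set.ofList palabras_descubiertas
  let asociadas : PySem.Set String := PySem.Set.ofList palabras_asociadas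
  let head := palabras_asociadas.map (fun p => if descubiertas.contains p then p else pvMask p)
  let tail := (PySem.List.dedup palabras_descubiertas).filter (fun p => !asociadas.contains p)
  head ++ tail

-- ===== PRECONDITION & SPEC =====
def Spec_ocultar_palabras (palabras_asociadas : List String) (palabras_descubiertas : List String) (out : List String) : Prop := out = ocultar_palabras_alt palabras_asociadas palabras_descubiertas
instance (palabras_asociadas : List String) (palabras_descubiertas : List String) (out : List String) : Decidable (Spec_ocultar_palabras palabras_asociadas palabras_descubiertas out) := by unfold Spec_ocultar_palabras; infer_instance

-- ===== CLAIM (what is proved, stated in full; the proofs are below) =====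
def Claim_equal_ocultar_palabras : Prop := ∀ (palabras_asociadas : List String) (palabras_descubiertas : List String), Dom_ocultar_palabras palabras_asociadas palabras_descubiertas → Spec_ocultar_palabras palabras_asociadas palabras_descubiertas (ocultar_palabras palabras_asociadas palabras_descubiertas)

-- ===== LEMMAS AND PROOFS =====

-- the masking function A applies to every word of the union list
def pvF (pd : List String) (p : String) : String :=
  if pd.any (fun q => p == q) then p else pvMask p

lemma pv_any_eq_mem (l : List String) (w : String) :
    (l.any fun q => w == q) = decide (w ∈ l) := by
  induction l with
  | nil => simp
  | cons x xs ih => simp [List.any_cons, ih]; by_cases h : w = x <;> simp [h]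

lemma pv_contains_eq (s : PySem.Set String) (w : String) :
    s.contains w = decide (w ∈ s) := by
  by_cases h : w ∈ s
  · rw [(PySem.Set.contains_iff s w).2 h]; simp [h]
  · have hne : s.contains w = false :=
      Bool.eq_false_iff.2 (fun hc => h ((PySem.Set.contains_iff s w).1 hc))
    rw [hne]; simp [h]

lemma pvF_eq_of_mem (pd : List String) (p : String) (h : p ∈ pd) : pvF pd p = p := by
  simp [pvF, pv_any_eq_mem, h]

-- A's dedup-append loop is PySem.Set.update (element by element it is Set.add)
lemma pv_listar_eq (pa pd : List String) :
    listar_palabras pa pd = pa ++ (PySem.Set.ofList pd).filter (fun y => !(PySem.Set.contains pa y)) := by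
  unfold listar_palabras
  rw [PySem.List.foldl_append_singleton, List.nil_append]
  have hstep : (fun (total : List String) p =>
      if total.any (fun q => p == q) then total else total ++ [p]) = PySem.Set.add := by
    funext total p
    simp [PySem.Set.add, pv_any_eq_mem]
  rw [hstep]
  exact PySem.Set.update_eq_append_filter pa pd

-- ===== VERDICT (by name: the statement is the Claim_ definition above) =====
theorem ocultar_palabras_spec : Claim_equal_ocultar_palabras := by
  intro pa pd _
  unfold Spec_ocultar_palabras ocultar_palabras ocultar_palabras_alt
  -- A's masking loop is a map of pvF over the union list
  have hA : ∀ (l : List String),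
      l.foldl (fun ocultas p => if pd.any (fun q => p == q) then ocultas ++ [p] else ocultas ++ [pvMask p]) []
        = l.map (pvF pd) := by
    intro l
    have := PySem.List.foldl_append_singleton_eq_map (pvF pd) l []
    rw [List.nil_append] at this
    rw [← this]
    apply PySem.List.foldl_congr_mem
    intro acc p _
    by_cases h : (pd.any fun q => p == q) = true <;> simp [pvF, h]
  rw [hA, pv_listar_eq, List.map_append]
  congr 1
  · -- masked head
    apply List.map_congr_left
    intro p _
    rw [pv_contains_eq]
    by_cases h : p ∈ pd <;>
      simp [pvF, pv_any_eq_mem, PySem.Set.mem_ofList, h]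
  · -- tail: every kept word is discovered, hence unmasked; the filters agree
    rw [PySem.List.dedup_eq_ofList]
    have hfil : (PySem.Set.ofList pd).filter (fun y => !(PySem.Set.contains pa y))
        = (PySem.Set.ofList pd).filter (fun p => !(PySem.Set.ofList pa).contains p) := by
      apply List.filter_congr
      intro y _
      rw [pv_contains_eq, pv_contains_eq]
      by_cases h : y ∈ pa <;> simp [PySem.Set.mem_ofList, h]
    rw [← hfil]
    have hid : List.map (pvF pd) ((PySem.Set.ofList pd).filter (fun y => !(PySem.Set.contains pa y)))
        = List.map id ((PySem.Set.ofList pd).filter (fun y => !(PySem.Set.contains pa y))) := by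
      apply List.map_congr_left
      intro y hy
      have hy' : y ∈ pd := by
        have := List.mem_of_mem_filter hy
        rwa [PySem.Set.mem_ofList] at this
      exact pvF_eq_of_mem pd y hy'
    rw [hid, List.map_id]
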